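-- pv_equiv track=rewrite | github.com/Rudique/CodeWars | Snail.py | help_func
-- ===== SOURCE A (Python) =====
-- def help_func(tiny_snail_map):
--     result = []
--     if len(tiny_snail_map) == 1:
--         return tiny_snail_map[0]
--     else:
--         x = 0
--         y = 0
--         dx = 1
--         dy = 0
--
--         for amount_of_elems in range(4 * (len(tiny_snail_map) - 1)):
--             result.append(tiny_snail_map[y][x])
--
--             test = x + dx if dx else y + dy
--
--             if test < 0 or test == len(tiny_snail_map):
--                 dx, dy = -dy, dx
--
--             x += dx
--             y += dy
--
--     return result
-- ===== SOURCE B (Python) =====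
-- def help_func(tiny_snail_map):
--     n = len(tiny_snail_map)
--     if n == 1:
--         return tiny_snail_map[0]
--     top = [tiny_snail_map[0][j] for j in range(n)]
--     right = [tiny_snail_map[i][n - 1] for i in range(1, n)]
--     bottom = [tiny_snail_map[n - 1][j] for j in range(n - 2, -1, -1)]
--     left = [tiny_snail_map[i][0] for i in range(n - 2, 0, -1)]
--     return top + right + bottom + left
-- ===== Notes on version B (the rewrite author's own statement) =====
-- stated objective: simpler
-- what changed: Replaces the direction-vector state-machine walk (x,y,dx,dy with turn detection) by direct concatenation of four index-range slices (top row, right column, reversed bottom row, reversed left column).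
import Mathlib
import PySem

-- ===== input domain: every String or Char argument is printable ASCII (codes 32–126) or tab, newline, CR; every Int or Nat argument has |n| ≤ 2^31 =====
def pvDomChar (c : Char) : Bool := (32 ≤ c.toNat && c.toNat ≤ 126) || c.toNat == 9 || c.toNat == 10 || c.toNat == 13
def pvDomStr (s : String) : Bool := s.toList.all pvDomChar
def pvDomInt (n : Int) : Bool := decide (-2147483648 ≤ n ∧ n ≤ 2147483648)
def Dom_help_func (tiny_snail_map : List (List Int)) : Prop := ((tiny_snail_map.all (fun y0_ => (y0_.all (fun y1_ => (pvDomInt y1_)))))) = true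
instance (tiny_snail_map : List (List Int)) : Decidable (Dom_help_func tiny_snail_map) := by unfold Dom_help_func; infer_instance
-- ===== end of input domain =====

-- B replaces A's direction-vector state-machine walk of the outer ring by the
-- concatenation of four index-range slices; objective: simpler.

-- tiny_snail_map[y][x]: total form of double indexing; Pre_ keeps indices in range
def pvCell (m : List (List Int)) (y x : Int) : Int :=
  PySem.List.pyGetD ((PySem.List.pyGet? m y).getD []) x 0

-- ===== PORT A =====
-- the for-loop over range(4*(n-1)) with state (result, x, y, dx, dy)
def help_func_loop (m : List (List Int)) (n : Int) :
    Nat → List Int → Int → Int → Int → Int → List Int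
  | 0, result, _x, _y, _dx, _dy => result
  | Nat.succ k, result, x, y, dx, dy =>
    let result' := result ++ [pvCell m y x]
    let test : Int := if dx ≠ 0 then x + dx else y + dy
    let d' : Int × Int := if test < 0 ∨ test = n then (-dy, dx) else (dx, dy)
    help_func_loop m n k result' (x + d'.1) (y + d'.2) d'.1 d'.2

def help_func (tiny_snail_map : List (List Int)) : List Int :=
  if tiny_snail_map.length == 1 then (PySem.List.pyGet? tiny_snail_map 0).getD []
  else
    help_func_loop tiny_snail_map (tiny_snail_map.length)
      (4 * (tiny_snail_map.length - 1)) [] 0 0 1 0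

-- ===== PORT B =====
def help_func_alt (tiny_snail_map : List (List Int)) : List Int :=
  let n : Int := tiny_snail_map.length
  if tiny_snail_map.length == 1 then (PySem.List.pyGet? tiny_snail_map 0).getD []
  else
    let top := (PySem.List.pyRange 0 n 1).map (fun j => pvCell tiny_snail_map 0 j)
    let right := (PySem.List.pyRange 1 n 1).map (fun i => pvCell tiny_snail_map i (n - 1))
    let bottom := (PySem.List.pyRange (n - 2) (-1) (-1)).map (fun j => pvCell tiny_snail_map (n - 1) j)
    let left := (PySem.List.pyRange (n - 2) 0 (-1)).map (fun i => pvCell tiny_snail_map i 0)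
    top ++ right ++ bottom ++ left

-- ===== PRECONDITION & SPEC =====
-- Pre_ excludes exactly the ragged inputs where Python A raises IndexError:
-- with 2 or more rows, every row must have at least as many entries as there are rows.
def Pre_help_func (tiny_snail_map : List (List Int)) : Prop :=
  tiny_snail_map.length ≤ 1 ∨ ∀ r ∈ tiny_snail_map, tiny_snail_map.length ≤ r.length
instance (tiny_snail_map : List (List Int)) : Decidable (Pre_help_func tiny_snail_map) := by
  unfold Pre_help_func; infer_instance

def pvWitness_help_func : List (List Int) := [[1, 2], [3, 4]]

def Spec_help_func (tiny_snail_map : List (List Int)) (out : List Int) : Prop := out = help_func_alt tiny_snail_map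
instance (tiny_snail_map : List (List Int)) (out : List Int) : Decidable (Spec_help_func tiny_snail_map out) := by unfold Spec_help_func; infer_instance

-- ===== CLAIM (what is proved, stated in full; the proofs are below) =====
def Claim_equal_help_func : Prop := ∀ (tiny_snail_map : List (List Int)), Dom_help_func tiny_snail_map → Pre_help_func tiny_snail_map → Spec_help_func tiny_snail_map (help_func tiny_snail_map)

-- ===== LEMMAS AND PROOFS =====

theorem range_map_shift {α : Type} (f : Int → α) (j : Int) (k : Nat) :
    (List.range (k + 1)).map (fun (t : Nat) => f (j + (t : Int))) =
      f j :: (List.range k).map (fun (t : Nat) => f (j + 1 + (t : Int))) := by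
  rw [List.range_succ_eq_map, List.map_cons, List.map_map]
  refine congrArg₂ _ (by simp) (List.map_congr_left fun t _ => ?_)
  show f (j + ((t : Nat) + 1 : Nat)) = f (j + 1 + t)
  congr 1; push_cast; ring

theorem range_map_shift_down {α : Type} (f : Int → α) (j : Int) (k : Nat) :
    (List.range (k + 1)).map (fun (t : Nat) => f (j - (t : Int))) =
      f j :: (List.range k).map (fun (t : Nat) => f (j - 1 - (t : Int))) := by
  rw [List.range_succ_eq_map, List.map_cons, List.map_map]
  refine congrArg₂ _ (by simp) (List.map_congr_left fun t _ => ?_)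
  show f (j - ((t : Nat) + 1 : Nat)) = f (j - 1 - t)
  congr 1; push_cast; ring

theorem phase_top (m : List (List Int)) :
    ∀ (k s : Nat) (res : List Int) (j : Int), 0 ≤ j → j + k = (m.length : Int) - 1 →
      help_func_loop m m.length (k + s) res j 0 1 0 =
      help_func_loop m m.length s
        (res ++ (List.range k).map (fun (t : Nat) => pvCell m 0 (j + (t : Int))))
        ((m.length : Int) - 1) 0 1 0 := by
  intro k
  induction k with
  | zero =>
    intro s res j h0 h1
    have hj : j = (m.length : Int) - 1 := by push_cast at h1; omega
    simp [hj]
  | succ k ih =>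
    intro s res j h0 h1
    have hstep : k + 1 + s = Nat.succ (k + s) := by omega
    have hcond : ¬((j + 1 : Int) < 0 ∨ (j + 1 : Int) = (m.length : Int)) := by
      push_cast at h1; omega
    rw [hstep]
    simp only [help_func_loop]
    simp only [ne_eq, one_ne_zero, not_false_eq_true, if_true, if_neg hcond]
    simp only [add_zero]
    rw [ih s (res ++ [pvCell m 0 j]) (j + 1) (by omega) (by push_cast at h1 ⊢; omega)]
    rw [range_map_shift (fun v => pvCell m 0 v) j k]
    simp

theorem corner1 (m : List (List Int)) (s : Nat) (res : List Int) :
    help_func_loop m m.length (1 + s) res ((m.length : Int) - 1) 0 1 0 =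
    help_func_loop m m.length s (res ++ [pvCell m 0 ((m.length : Int) - 1)])
      ((m.length : Int) - 1) 1 0 1 := by
  rw [Nat.add_comm 1 s]
  simp only [help_func_loop]
  have hcond : (((m.length : Int) - 1 + 1) < 0 ∨ ((m.length : Int) - 1 + 1) = (m.length : Int)) := by omega
  simp only [ne_eq, one_ne_zero, not_false_eq_true, if_true, if_pos hcond]
  norm_num

theorem phase_right (m : List (List Int)) :
    ∀ (k s : Nat) (res : List Int) (i : Int), 0 ≤ i → i + k = (m.length : Int) - 1 →
      help_func_loop m m.length (k + s) res ((m.length : Int) - 1) i 0 1 =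
      help_func_loop m m.length s
        (res ++ (List.range k).map (fun (t : Nat) => pvCell m (i + (t : Int)) ((m.length : Int) - 1)))
        ((m.length : Int) - 1) ((m.length : Int) - 1) 0 1 := by
  intro k
  induction k with
  | zero =>
    intro s res i h0 h1
    have hi : i = (m.length : Int) - 1 := by push_cast at h1; omega
    simp [hi]
  | succ k ih =>
    intro s res i h0 h1
    have hstep : k + 1 + s = Nat.succ (k + s) := by omega
    have hcond : ¬((i + 1 : Int) < 0 ∨ (i + 1 : Int) = (m.length : Int)) := by
      push_cast at h1; omega
    rw [hstep]
    simp only [help_func_loop]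
    simp only [ne_eq, not_true_eq_false, if_false, if_neg hcond]
    simp only [add_zero]
    rw [ih s (res ++ [pvCell m i ((m.length : Int) - 1)]) (i + 1) (by omega)
      (by push_cast at h1 ⊢; omega)]
    rw [range_map_shift (fun v => pvCell m v ((m.length : Int) - 1)) i k]
    simp

theorem corner2 (m : List (List Int)) (s : Nat) (res : List Int) :
    help_func_loop m m.length (1 + s) res ((m.length : Int) - 1) ((m.length : Int) - 1) 0 1 =
    help_func_loop m m.length s
      (res ++ [pvCell m ((m.length : Int) - 1) ((m.length : Int) - 1)])
      ((m.length : Int) - 2) ((m.length : Int) - 1) (-1) 0 := by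
  rw [Nat.add_comm 1 s]
  simp only [help_func_loop]
  have hcond : (((m.length : Int) - 1 + 1) < 0 ∨ ((m.length : Int) - 1 + 1) = (m.length : Int)) := by omega
  simp only [ne_eq, not_true_eq_false, if_false, if_pos hcond]
  norm_num
  congr 1; ring

theorem phase_bottom (m : List (List Int)) :
    ∀ (k s : Nat) (res : List Int) (j : Int), j = (k : Int) → j ≤ (m.length : Int) - 2 →
      help_func_loop m m.length (k + s) res j ((m.length : Int) - 1) (-1) 0 =
      help_func_loop m m.length s
        (res ++ (List.range k).map (fun (t : Nat) => pvCell m ((m.length : Int) - 1) (j - (t : Int))))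
        0 ((m.length : Int) - 1) (-1) 0 := by
  intro k
  induction k with
  | zero =>
    intro s res j h0 h1
    have hj : j = 0 := by push_cast at h0; omega
    simp [hj]
  | succ k ih =>
    intro s res j h0 h1
    have hstep : k + 1 + s = Nat.succ (k + s) := by omega
    have hcond : ¬((j + -1 : Int) < 0 ∨ (j + -1 : Int) = (m.length : Int)) := by
      push_cast at h0; omega
    rw [hstep]
    simp only [help_func_loop]
    simp only [ne_eq, neg_eq_zero, one_ne_zero, not_false_eq_true, if_true, if_neg hcond]
    rw [show (j + -1 : Int) = j - 1 by ring] at *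
    simp only [add_zero]
    rw [ih s (res ++ [pvCell m ((m.length : Int) - 1) j]) (j - 1) (by push_cast at h0 ⊢; omega)
      (by omega)]
    rw [range_map_shift_down (fun v => pvCell m ((m.length : Int) - 1) v) j k]
    simp

theorem corner3 (m : List (List Int)) (s : Nat) (res : List Int) :
    help_func_loop m m.length (1 + s) res 0 ((m.length : Int) - 1) (-1) 0 =
    help_func_loop m m.length s (res ++ [pvCell m ((m.length : Int) - 1) 0])
      0 ((m.length : Int) - 2) 0 (-1) := by
  rw [Nat.add_comm 1 s]
  simp only [help_func_loop]
  have hcond : ((0 + -1 : Int) < 0 ∨ (0 + -1 : Int) = (m.length : Int)) := by omega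
  simp only [ne_eq, neg_eq_zero, one_ne_zero, not_false_eq_true, if_true, if_pos hcond]
  norm_num
  congr 1; ring

theorem phase_left (m : List (List Int)) :
    ∀ (k s : Nat) (res : List Int) (i : Int), i = (k : Int) → i ≤ (m.length : Int) - 2 →
      help_func_loop m m.length (k + s) res 0 i 0 (-1) =
      help_func_loop m m.length s
        (res ++ (List.range k).map (fun (t : Nat) => pvCell m (i - (t : Int)) 0))
        0 0 0 (-1) := by
  intro k
  induction k with
  | zero =>
    intro s res i h0 h1
    have hi : i = 0 := by push_cast at h0; omega
    simp [hi]
  | succ k ih =>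
    intro s res i h0 h1
    have hstep : k + 1 + s = Nat.succ (k + s) := by omega
    have hcond : ¬((i + -1 : Int) < 0 ∨ (i + -1 : Int) = (m.length : Int)) := by
      push_cast at h0; omega
    rw [hstep]
    simp only [help_func_loop]
    simp only [ne_eq, not_true_eq_false, if_false, if_neg hcond]
    rw [show (i + -1 : Int) = i - 1 by ring] at *
    simp only [add_zero]
    rw [ih s (res ++ [pvCell m i 0]) (i - 1) (by push_cast at h0 ⊢; omega) (by omega)]
    rw [range_map_shift_down (fun v => pvCell m v 0) i k]
    simp

theorem range_succ_map' {α : Type} (g : Nat → α) (L k : Nat) (h : L = k + 1) :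
    (List.range L).map g = (List.range k).map g ++ [g k] := by
  subst h; simp [List.range_succ]

theorem main_eq (m : List (List Int)) : help_func m = help_func_alt m := by
  by_cases h1 : m.length = 1
  · simp [help_func, help_func_alt, h1]
  by_cases h0 : m.length = 0
  · have hm : m = [] := List.eq_nil_of_length_eq_zero h0
    subst hm; rfl
  have hL : 2 ≤ m.length := by omega
  simp only [help_func, help_func_alt, beq_iff_eq, if_neg h1]
  have hsteps : 4 * (m.length - 1) =
      (m.length - 1) + (1 + ((m.length - 2) + (1 + ((m.length - 2) + (1 + ((m.length - 2) + 0)))))) := by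
    omega
  rw [hsteps]
  rw [phase_top m (m.length - 1) _ [] 0 le_rfl (by omega)]
  rw [corner1]
  rw [phase_right m (m.length - 2) _ _ 1 (by omega) (by omega)]
  rw [corner2]
  rw [phase_bottom m (m.length - 2) _ _ ((m.length : Int) - 2) (by omega) (by omega)]
  rw [corner3]
  rw [phase_left m (m.length - 2) _ _ ((m.length : Int) - 2) (by omega) (by omega)]
  simp only [help_func_loop]
  rw [PySem.List.pyRange_one 0 (m.length : Int), PySem.List.pyRange_one 1 (m.length : Int),
    PySem.List.pyRange_neg_one ((m.length : Int) - 2) (-1),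
    PySem.List.pyRange_neg_one ((m.length : Int) - 2) 0]
  have e0 : ((m.length : Int) - 0).toNat = m.length := by omega
  have e1 : ((m.length : Int) - 1).toNat = m.length - 1 := by omega
  have e2 : ((m.length : Int) - 2 - -1).toNat = m.length - 1 := by omega
  have e3 : ((m.length : Int) - 2 - 0).toNat = m.length - 2 := by omega
  rw [e0, e1, e2, e3]
  rw [List.map_map, List.map_map, List.map_map, List.map_map]
  simp only [Function.comp_def]
  rw [range_succ_map' (fun k : Nat => pvCell m 0 (0 + (k : Int))) m.length (m.length - 1)
      (by omega),
    range_succ_map' (fun k : Nat => pvCell m (1 + (k : Int)) ((m.length : Int) - 1))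
      (m.length - 1) (m.length - 2) (by omega),
    range_succ_map' (fun k : Nat =>
        pvCell m ((m.length : Int) - 1) ((m.length : Int) - 2 - (k : Int)))
      (m.length - 1) (m.length - 2) (by omega)]
  have c1 : ((m.length - 1 : Nat) : Int) = (m.length : Int) - 1 := by omega
  have c2 : ((m.length - 2 : Nat) : Int) = (m.length : Int) - 2 := by omega
  have d1 : (0 : Int) + ((m.length : Int) - 1) = (m.length : Int) - 1 := by ring
  have d2 : (1 : Int) + ((m.length : Int) - 2) = (m.length : Int) - 1 := by ring
  have d3 : ((m.length : Int) - 2) - ((m.length : Int) - 2) = 0 := by ring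
  simp only [c1, c2, d1, d2, d3, List.append_assoc, List.cons_append, List.nil_append]

-- ===== VERDICT (by name: the statement is the Claim_ definition above) =====
theorem help_func_spec : Claim_equal_help_func := by
  intro m _ _
  exact main_eq m
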